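-- pv_equiv track=rewrite | github.com/QuillCloud/Implement-STP-over-UDP | sender.py | create_pac_and_exack
-- ===== SOURCE A (Python) =====
-- def create_header(seqnumber, ack):
--     cre_header = ['0', '0', '0', '0', '0']
--     cre_header[0] = str(seqnumber)
--     cre_header[1] = str(ack)
--     return cre_header
--
-- def create_pac_and_exack(seg, isn, acknum):
--     pac = []
--     cur = isn
--     ack = acknum
--     ex_ack = []
--     for i in range(len(seg)):
--         h = create_header(cur, ack)
--         cur = (cur + len(seg[i])) % 4294967295
--         ex_ack.append(cur)
--         sp = ' '.join(h) + '\n' + seg[i]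
--         pac.append(sp)
--     return pac, ex_ack
-- ===== SOURCE B (Python) =====
-- def create_header(seqnumber, ack):
--     cre_header = ['0', '0', '0', '0', '0']
--     cre_header[0] = str(seqnumber)
--     cre_header[1] = str(ack)
--     return cre_header
--
--
-- def create_pac_and_exack(seg, isn, acknum):
--     MOD = 4294967295
--     # pass 1: cumulative (modded) byte offsets = the expected ack numbers
--     ex_ack = []
--     cur = isn
--     for s in seg:
--         cur = (cur + len(s)) % MOD
--         ex_ack.append(cur)
--     # sequence-number table: raw isn first, then all but the last cumulative offset
--     offsets = [isn] + ex_ack[:-1]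
--     # pass 2: zip the offset table with the segments to build the packets
--     pac = [' '.join(create_header(off, acknum)) + '\n' + s
--            for off, s in zip(offsets, seg)]
--     return pac, ex_ack
-- ===== Notes on version B (the rewrite author's own statement) =====
-- stated objective: alternative
-- what changed: Replaces A's single loop that interleaves header building with the running-offset update by two passes: first a prefix-sum pass producing the expected-ack table, then a zip of an offsets table (raw isn followed by ex_ack[:-1]) with the segments building the packets in a comprehension.
import Mathlib
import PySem

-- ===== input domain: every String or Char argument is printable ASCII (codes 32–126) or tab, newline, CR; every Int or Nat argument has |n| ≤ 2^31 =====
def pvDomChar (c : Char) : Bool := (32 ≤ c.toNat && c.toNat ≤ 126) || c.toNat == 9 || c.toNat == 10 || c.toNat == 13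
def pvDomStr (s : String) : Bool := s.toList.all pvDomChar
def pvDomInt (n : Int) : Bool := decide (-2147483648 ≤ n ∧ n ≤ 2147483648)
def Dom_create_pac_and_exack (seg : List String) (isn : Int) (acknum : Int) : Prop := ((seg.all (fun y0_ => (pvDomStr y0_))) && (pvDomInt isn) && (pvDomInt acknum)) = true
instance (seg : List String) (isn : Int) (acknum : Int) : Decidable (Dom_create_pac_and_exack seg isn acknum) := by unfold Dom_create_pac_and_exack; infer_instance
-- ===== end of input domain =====

-- B rebuilds the result in two passes (prefix-sum ack table, then offsets-zip-segments); alternative decomposition, same cost.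

-- ===== PORT A =====
def create_header (seqnumber : Int) (ack : Int) : List String :=
  [PySem.Int.toStr seqnumber, PySem.Int.toStr ack, "0", "0", "0"]

def create_pac_and_exack (seg : List String) (isn : Int) (acknum : Int) : List String × List Int :=
  let st := seg.foldl (fun (st : List String × Int × List Int) s =>
      let h := create_header st.2.1 acknum
      let cur := PySem.Int.mod (st.2.1 + PySem.Str.len s) 4294967295
      (st.1 ++ [PySem.Str.join " " h ++ "\n" ++ s], cur, st.2.2 ++ [cur]))
    ([], isn, [])
  (st.1, st.2.2)

-- ===== PORT B =====
def create_pac_and_exack_alt (seg : List String) (isn : Int) (acknum : Int) : List String × List Int :=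
  let ex_ack := (seg.foldl (fun (st : List Int × Int) s =>
      let cur := PySem.Int.mod (st.2 + PySem.Str.len s) 4294967295
      (st.1 ++ [cur], cur)) ([], isn)).1
  let offsets := isn :: PySem.List.slice ex_ack none (some (-1))
  let pac := (offsets.zip seg).map
      (fun p => PySem.Str.join " " (create_header p.1 acknum) ++ "\n" ++ p.2)
  (pac, ex_ack)

-- ===== PRECONDITION & SPEC =====
def Spec_create_pac_and_exack (seg : List String) (isn : Int) (acknum : Int) (out : List String × List Int) : Prop := out = create_pac_and_exack_alt seg isn acknum
instance (seg : List String) (isn : Int) (acknum : Int) (out : List String × List Int) : Decidable (Spec_create_pac_and_exack seg isn acknum out) := by unfold Spec_create_pac_and_exack; infer_instance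

-- ===== CLAIM (what is proved, stated in full; the proofs are below) =====
def Claim_equal_create_pac_and_exack : Prop := ∀ (seg : List String) (isn : Int) (acknum : Int), Dom_create_pac_and_exack seg isn acknum → Spec_create_pac_and_exack seg isn acknum (create_pac_and_exack seg isn acknum)

-- ===== LEMMAS AND PROOFS =====

-- Recursive characterisation of the expected-ack list.
def exSpec : List String → Int → List Int
  | [], _ => []
  | s :: r, c =>
      let t := PySem.Int.mod (c + PySem.Str.len s) 4294967295
      t :: exSpec r t

def mkPac (acknum : Int) (c : Int) (s : String) : String :=
  PySem.Str.join " " (create_header c acknum) ++ "\n" ++ s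

def pacSpec (acknum : Int) : List String → Int → List String
  | [], _ => []
  | s :: r, c =>
      let t := PySem.Int.mod (c + PySem.Str.len s) 4294967295
      mkPac acknum c s :: pacSpec acknum r t

def finCur : List String → Int → Int
  | [], c => c
  | s :: r, c => finCur r (PySem.Int.mod (c + PySem.Str.len s) 4294967295)

lemma loopA_eq (acknum : Int) : ∀ (seg : List String) (c : Int) (pac : List String) (ex : List Int),
    seg.foldl (fun (st : List String × Int × List Int) s =>
      let h := create_header st.2.1 acknum
      let cur := PySem.Int.mod (st.2.1 + PySem.Str.len s) 4294967295
      (st.1 ++ [PySem.Str.join " " h ++ "\n" ++ s], cur, st.2.2 ++ [cur])) (pac, c, ex)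
    = (pac ++ pacSpec acknum seg c, finCur seg c, ex ++ exSpec seg c) := by
  intro seg
  induction seg with
  | nil => intro c pac ex; simp [pacSpec, finCur, exSpec]
  | cons s r ih =>
      intro c pac ex
      simp only [List.foldl_cons, ih, pacSpec, finCur, exSpec, mkPac]
      simp

lemma loopB_eq : ∀ (seg : List String) (c : Int) (ex : List Int),
    seg.foldl (fun (st : List Int × Int) s =>
      let cur := PySem.Int.mod (st.2 + PySem.Str.len s) 4294967295
      (st.1 ++ [cur], cur)) (ex, c)
    = (ex ++ exSpec seg c, finCur seg c) := by
  intro seg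
  induction seg with
  | nil => intro c ex; simp [exSpec, finCur]
  | cons s r ih =>
      intro c ex
      simp only [List.foldl_cons, ih, exSpec, finCur]
      simp

lemma slice_neg_one_dropLast (l : List Int) :
    PySem.List.slice l none (some (-1)) = l.dropLast := by
  simp [PySem.List.slice, List.dropLast_eq_take]

lemma exSpec_ne_nil (s : String) (r : List String) (c : Int) : exSpec (s :: r) c ≠ [] := by
  simp [exSpec]

lemma zip_offsets_eq (acknum : Int) : ∀ (seg : List String) (c : Int),
    ((c :: (exSpec seg c).dropLast).zip seg).map
      (fun p => PySem.Str.join " " (create_header p.1 acknum) ++ "\n" ++ p.2)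
    = pacSpec acknum seg c := by
  intro seg
  induction seg with
  | nil => intro c; simp [exSpec, pacSpec]
  | cons s r ih =>
      intro c
      cases r with
      | nil => simp [exSpec, pacSpec, mkPac]
      | cons s' r' =>
          have h1 : exSpec (s :: s' :: r') c
              = PySem.Int.mod (c + PySem.Str.len s) 4294967295 :: exSpec (s' :: r')
                  (PySem.Int.mod (c + PySem.Str.len s) 4294967295) := rfl
          rw [h1, List.dropLast_cons_of_ne_nil (exSpec_ne_nil _ _ _),
            List.zip_cons_cons, List.map_cons, ih]
          simp [pacSpec, mkPac]

-- ===== VERDICT (by name: the statement is the Claim_ definition above) =====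
theorem create_pac_and_exack_spec : Claim_equal_create_pac_and_exack := by
  intro seg isn acknum _
  unfold Spec_create_pac_and_exack create_pac_and_exack create_pac_and_exack_alt
  simp only [loopA_eq, loopB_eq, slice_neg_one_dropLast, List.nil_append]
  rw [zip_offsets_eq]
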